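-- pv_equiv track=rewrite | github.com/huangjihui511/code-prediction4 | test3.py | split2pair2
-- ===== SOURCE A (Python) =====
-- def split2pair2(l):
--     result = []
--     inputstr = []
--     for i in range(1, len(l)-1):
--         inputstr += l[i - 1]
--         outputstr = l[i]
--         result.append((inputstr.copy(),outputstr.copy()))
--     # for i in range(1, len(l)):
--     #     input = []
--     #     for j in range(i):
--     #         input += l[j]
--     #         for k in range(len(l[i])):
--     #             input += l[i][:k]
--     #             output = l[i][k:]
--     #             result.append((input.copy(),output.copy()))
--     return result
-- ===== SOURCE B (Python) =====
-- def split2pair2(l):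
--     result = []
--     for i in range(1, len(l) - 1):
--         prefix = []
--         for j in range(i):
--             prefix += l[j]
--         result.append((prefix, l[i].copy()))
--     return result
-- ===== Notes on version B (the rewrite author's own statement) =====
-- stated objective: alternative
-- what changed: B drops A's running accumulator (and its per-iteration .copy()) and instead rebuilds each prefix from scratch with an inner loop over l[:i], yielding naturally independent prefix lists.
import Mathlib
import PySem

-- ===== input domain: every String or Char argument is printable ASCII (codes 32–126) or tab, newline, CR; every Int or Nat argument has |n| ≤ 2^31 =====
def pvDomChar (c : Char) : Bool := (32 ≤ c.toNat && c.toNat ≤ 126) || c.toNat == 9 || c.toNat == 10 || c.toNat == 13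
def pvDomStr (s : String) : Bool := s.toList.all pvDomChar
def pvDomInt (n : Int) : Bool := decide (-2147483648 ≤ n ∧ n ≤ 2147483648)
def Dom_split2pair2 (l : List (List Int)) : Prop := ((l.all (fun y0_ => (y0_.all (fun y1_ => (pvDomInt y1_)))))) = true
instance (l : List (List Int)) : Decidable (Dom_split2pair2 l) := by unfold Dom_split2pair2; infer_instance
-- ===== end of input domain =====

-- B rebuilds each prefix from scratch (inner loop over l[:i]) instead of A's running accumulator with per-iteration copies; alternative decomposition, same results.

-- ===== PORT A =====
-- A: one pass over i in range(1, len(l)-1), maintaining a running inputstr accumulator.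
def split2pair2 (l : List (List Int)) : List (List Int × List Int) :=
  ((PySem.List.pyRange 1 ((l.length : Int) - 1) 1).foldl
    (fun (st : List (List Int × List Int) × List Int) i =>
      let inputstr := st.2 ++ PySem.List.pyGetD l (i - 1) []
      let outputstr := PySem.List.pyGetD l i []
      (st.1 ++ [(inputstr, outputstr)], inputstr))
    ([], [])).1

-- ===== PORT B =====
-- B: for each i, recompute the prefix with an inner loop over range(i).
def split2pair2_alt (l : List (List Int)) : List (List Int × List Int) :=
  (PySem.List.pyRange 1 ((l.length : Int) - 1) 1).foldl
    (fun result i =>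
      let pre := (PySem.List.pyRange 0 i 1).foldl
        (fun acc j => acc ++ PySem.List.pyGetD l j []) []
      result ++ [(pre, PySem.List.pyGetD l i [])])
    []

-- ===== PRECONDITION & SPEC =====
def Spec_split2pair2 (l : List (List Int)) (out : List (List Int × List Int)) : Prop := out = split2pair2_alt l
instance (l : List (List Int)) (out : List (List Int × List Int)) : Decidable (Spec_split2pair2 l out) := by unfold Spec_split2pair2; infer_instance

-- ===== CLAIM (what is proved, stated in full; the proofs are below) =====
def Claim_equal_split2pair2 : Prop := ∀ (l : List (List Int)), Dom_split2pair2 l → Spec_split2pair2 l (split2pair2 l)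

-- ===== LEMMAS AND PROOFS =====

-- B's recomputed prefix at index i (an Int ≥ 0 in practice)
def pvPrefix (l : List (List Int)) (i : Int) : List Int :=
  (PySem.List.pyRange 0 i 1).foldl (fun acc j => acc ++ PySem.List.pyGetD l j []) []

theorem pvPrefix_succ (l : List (List Int)) (m : Nat) :
    pvPrefix l ((m : Int) + 1) = pvPrefix l m ++ PySem.List.pyGetD l (m : Int) [] := by
  unfold pvPrefix
  rw [PySem.List.pyRange_one_succ_right (by positivity)]
  rw [List.foldl_append]
  rfl

-- invariant of A's fold over indices 1..m: result = B's pairs, accumulator = B's prefix at m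
theorem fold_inv (l : List (List Int)) (m : Nat) :
    ((List.range m).map (fun k : Nat => ((1 : Int) + (k : Int)))).foldl
      (fun (st : List (List Int × List Int) × List Int) i =>
        let inputstr := st.2 ++ PySem.List.pyGetD l (i - 1) []
        let outputstr := PySem.List.pyGetD l i []
        (st.1 ++ [(inputstr, outputstr)], inputstr))
      ([], [])
    = (((List.range m).map (fun k : Nat => ((1 : Int) + (k : Int)))).foldl
        (fun result i =>
          result ++ [(pvPrefix l i, PySem.List.pyGetD l i [])]) [],
       pvPrefix l m) := by
  induction m with
  | zero => rfl
  | succ m ih =>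
    rw [List.range_succ, List.map_append, List.foldl_append, List.foldl_append, ih]
    simp only [List.map_cons, List.map_nil, List.foldl_cons, List.foldl_nil]
    rw [show (1 : Int) + (m : Int) - 1 = (m : Int) from by ring,
        show ((m + 1 : Nat) : Int) = (m : Int) + 1 from by push_cast; ring,
        show (1 : Int) + (m : Int) = (m : Int) + 1 from by ring,
        pvPrefix_succ]

-- ===== VERDICT (by name: the statement is the Claim_ definition above) =====
theorem split2pair2_spec : Claim_equal_split2pair2 := by
  intro l _
  unfold Spec_split2pair2 split2pair2 split2pair2_alt
  rw [PySem.List.pyRange_one]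
  rw [fold_inv]
  rfl
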